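-- pv_equiv track=rewrite | github.com/Zikrig/diffie | person.py | primRoots
-- ===== SOURCE A (Python) =====
-- import math
--
-- def isSimple(a):        # проверка на простоту
--     for c in range(2,int(math.sqrt(a))):
--         if a%c==0:
--             return 0
--     return 1
--
-- def sqr(a,b):
--     while b != 0:
--         a, b = b, a % b
--     return a
--
-- def primRoots(modulo):
--     roots = []
--     required_set = set(num for num in range (1, modulo) if sqr(num, modulo) == 1)
--
--     for g in range(1, modulo):
--         actual_set = set(pow(g, powers) % modulo for powers in range (1, modulo))
--         if required_set == actual_set:
--             roots.append(g)
--     res=0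
--     for res in roots:
--         if(isSimple(res)):
--             break
--     return res
-- ===== SOURCE B (Python) =====
-- import math
--
-- def primRoots(modulo):
--     n = modulo
--     # Euler's totient: number of units mod n
--     phi = sum(1 for m in range(1, n) if math.gcd(m, n) == 1)
--     res = 0
--     for g in range(1, n):
--         if math.gcd(g, n) != 1:
--             continue
--         # multiplicative order of g: walk x, g*x, ... until it returns to 1
--         x = g % n
--         k = 1
--         while x != 1:
--             x = x * g % n
--             k += 1
--         if k == phi:          # order phi <=> g generates all units
--             res = g
--             # trial division with the exclusive int(sqrt) bound (as in the original)
--             if all(g % c for c in range(2, math.isqrt(g))):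
--                 break
--     return res
-- ===== Notes on version B (the rewrite author's own statement) =====
-- stated objective: faster
-- what changed: A tests each candidate g by materialising the whole set {g^k mod n : k<n} with huge-integer pow and comparing it to the set of units; B never builds any set: it computes Euler's phi once, then for each coprime g computes the multiplicative order by one modular walk until the power returns to 1, g being a primitive root iff that order equals phi.
import Mathlib
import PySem

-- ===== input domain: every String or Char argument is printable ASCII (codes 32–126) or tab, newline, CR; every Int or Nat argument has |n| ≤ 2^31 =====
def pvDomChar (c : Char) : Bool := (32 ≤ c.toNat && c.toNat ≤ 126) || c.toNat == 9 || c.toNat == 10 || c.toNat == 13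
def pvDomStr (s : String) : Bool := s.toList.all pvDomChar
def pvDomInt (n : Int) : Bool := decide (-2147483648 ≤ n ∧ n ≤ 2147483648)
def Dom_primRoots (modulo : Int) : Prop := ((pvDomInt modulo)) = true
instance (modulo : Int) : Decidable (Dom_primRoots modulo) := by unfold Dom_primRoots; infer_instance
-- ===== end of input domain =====

-- B replaces A's per-candidate power-set construction (huge-integer pow, set comparison against
-- the precomputed set of units) by a set-free test: Euler's phi counted once, then one modular
-- walk per coprime candidate measuring its multiplicative order; faster in a timing run.

-- ===== PORT A =====
-- termination fact for the Euclid loop 'while b != 0: a, b = b, a % b'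
theorem pvSqrDec (a b : Int) (hb : ¬ b = 0) : (PySem.Int.mod a b).natAbs < b.natAbs := by
  rcases lt_or_gt_of_ne hb with h | h
  · have h1 := PySem.Int.mod_neg_bounds a h
    omega
  · have h1 := PySem.Int.mod_nonneg a h
    have h2 := PySem.Int.mod_lt a h
    omega

-- isSimple: the early-return loop is modelled by an Option accumulator; int(math.sqrt(a)) is
-- Nat.sqrt a.toNat exactly for the arguments reached here (0 ≤ a ≤ 2^31, where the float sqrt
-- truncates to the integer square root)
def isSimpleA (a : Int) : Int :=
  ((PySem.List.pyRange 2 (Int.ofNat (Nat.sqrt a.toNat)) 1).foldl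
     (fun acc c => match acc with
       | some r => some r
       | none => if PySem.Int.mod a c == 0 then some 0 else none) (none : Option Int)).getD 1

-- sqr(a, b): Euclid's algorithm with Python's floor-mod
def sqrA (a b : Int) : Int :=
  if h : b = 0 then a else sqrA b (PySem.Int.mod a b)
termination_by b.natAbs
decreasing_by exact pvSqrDec a b h

def primRoots (modulo : Int) : Int :=
  let required : PySem.Set Int :=
    PySem.Set.ofList ((PySem.List.pyRange 1 modulo 1).filter (fun num => sqrA num modulo == 1))
  let roots : List Int :=
    (PySem.List.pyRange 1 modulo 1).foldl (fun roots g =>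
      let actual : PySem.Set Int :=
        PySem.Set.ofList ((PySem.List.pyRange 1 modulo 1).map
          (fun powers => PySem.Int.mod (g ^ powers.toNat) modulo))
      if PySem.Set.equal required actual then roots ++ [g] else roots) []
  -- res = 0; for res in roots: if isSimple(res): break  — loop state (res, broke)
  (roots.foldl (fun (st : Int × Bool) r =>
      if st.2 then st
      else if isSimpleA r != 0 then (r, true) else (r, false)) (0, false)).1

-- ===== PORT B =====
-- 'x = g % n; k = 1; while x != 1: x = x*g % n; k += 1' — the walk measuring the multiplicative
-- order; fuel-bounded with fuel = n.toNat, which suffices on every call B makes (g coprime to n,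
-- order ≤ phi(n) ≤ n-1 by Euler's theorem, proved below)
def walkOrd (n g : Int) : Nat → Int → Int → Int
  | 0, _, k => k
  | fuel+1, x, k => if x == 1 then k else walkOrd n g fuel (PySem.Int.mod (x * g) n) (k + 1)

def primRoots_alt (modulo : Int) : Int :=
  -- phi = sum(1 for m in range(1, n) if math.gcd(m, n) == 1)
  let phi : Int := (((PySem.List.pyRange 1 modulo 1).filter
      (fun m => Int.gcd m modulo == 1)).map (fun _ => (1 : Int))).sum
  ((PySem.List.pyRange 1 modulo 1).foldl (fun (st : Int × Bool) g =>
    if st.2 then st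
    else if Int.gcd g modulo != 1 then st
    else
      let k := walkOrd modulo g modulo.toNat (PySem.Int.mod g modulo) 1
      if k == phi then
        -- math.isqrt(g) = Nat.sqrt g.toNat (g ≥ 0 here)
        if (PySem.List.pyRange 2 (Int.ofNat (Nat.sqrt g.toNat)) 1).all
             (fun c => PySem.Int.mod g c != 0) then (g, true) else (g, false)
      else st) (0, false)).1

-- ===== PRECONDITION & SPEC =====
def Spec_primRoots (modulo : Int) (out : Int) : Prop := out = primRoots_alt modulo
instance (modulo : Int) (out : Int) : Decidable (Spec_primRoots modulo out) := by unfold Spec_primRoots; infer_instance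

-- ===== CLAIM (what is proved, stated in full; the proofs are below) =====
def Claim_equal_primRoots : Prop := ∀ (modulo : Int), Dom_primRoots modulo → Spec_primRoots modulo (primRoots modulo)

-- ===== LEMMAS AND PROOFS =====

-- sqr is gcd on the nonnegative arguments it is called with
theorem sqrA_eq_gcd (a b : Int) (ha : 0 ≤ a) (hb : 0 ≤ b) : sqrA a b = (Int.gcd a b : Int) := by
  rw [sqrA]
  split_ifs with h
  · subst h; simp [Int.gcd, Int.natAbs_of_nonneg ha]
  · have hb' : 0 < b := lt_of_le_of_ne hb (Ne.symm h)
    rw [PySem.Int.mod_eq_emod_of_pos hb']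
    rw [sqrA_eq_gcd b (a % b) hb (Int.emod_nonneg a h)]
    congr 1
    rw [Int.gcd_comm b, Int.gcd_emod]
termination_by b.natAbs
decreasing_by
  rw [← PySem.Int.mod_eq_emod_of_pos hb']
  exact pvSqrDec a b h

-- the early-return trial-division loop, characterised
theorem pvTrialFold_some (a r : Int) (l : List Int) :
    l.foldl (fun acc c => match acc with
      | some r' => some r'
      | none => if PySem.Int.mod a c == 0 then some 0 else none) (some r : Option Int) = some r := by
  induction l with
  | nil => rfl
  | cons c l ih => simpa using ih

theorem pvTrialFold_none (a : Int) (l : List Int) :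
    l.foldl (fun acc c => match acc with
      | some r' => some r'
      | none => if PySem.Int.mod a c == 0 then some 0 else none) (none : Option Int)
    = if l.all (fun c => PySem.Int.mod a c != 0) then none else some 0 := by
  induction l with
  | nil => rfl
  | cons c l ih =>
    simp only [List.foldl, List.all_cons]
    by_cases h : PySem.Int.mod a c = 0
    · rw [if_pos (show (PySem.Int.mod a c == 0) = true from by simp [h])]
      rw [pvTrialFold_some]
      simp [h]
    · rw [if_neg (show ¬ (PySem.Int.mod a c == 0) = true from by simp [h])]
      rw [ih]
      simp [h]

-- A's truthiness test on isSimple equals B's all-loop over the same range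
theorem isSimpleA_ne_zero (a : Int) :
    (isSimpleA a != 0)
    = (PySem.List.pyRange 2 (Int.ofNat (Nat.sqrt a.toNat)) 1).all
        (fun c => PySem.Int.mod a c != 0) := by
  unfold isSimpleA
  rw [pvTrialFold_none]
  by_cases h : (PySem.List.pyRange 2 (Int.ofNat (Nat.sqrt a.toNat)) 1).all
      (fun c => PySem.Int.mod a c != 0) = true
  · rw [if_pos h, h]; rfl
  · rw [if_neg h]
    simp at h ⊢
    obtain ⟨x, h1, h2, h3⟩ := h
    exact ⟨x, ⟨h1, h2⟩, h3⟩

-- A's required-set filter (Euclid) and B's filter (math.gcd) coincide on range(1, n)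
theorem pvFilterEq (n : Int) :
    (PySem.List.pyRange 1 n 1).filter (fun num => sqrA num n == 1)
    = (PySem.List.pyRange 1 n 1).filter (fun m => Int.gcd m n == 1) := by
  apply List.filter_congr
  intro x hx
  rw [PySem.List.mem_pyRange_one] at hx
  rw [sqrA_eq_gcd x n (by omega) (by omega)]
  rw [Bool.eq_iff_iff]
  simp only [beq_iff_eq]
  omega

-- B's sum of ones is the filter's length
theorem pvPhiEq (l : List Int) : ((l.map (fun _ => (1 : Int))).sum) = (l.length : Int) := by
  induction l with
  | nil => rfl
  | cons a l ih =>
    simp only [List.map_cons, List.sum_cons, List.length_cons, ih]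
    push_cast
    ring

-- one multiplication step of the walk
theorem pvStep (a g n : Int) (hn : 0 < n) :
    PySem.Int.mod (PySem.Int.mod a n * g) n = PySem.Int.mod (a * g) n := by
  rw [PySem.Int.mod_eq_emod_of_pos hn, PySem.Int.mod_eq_emod_of_pos hn,
      PySem.Int.mod_eq_emod_of_pos hn]
  rw [Int.mul_emod, Int.emod_emod_of_dvd _ (dvd_refl n)]
  conv_rhs => rw [Int.mul_emod]

-- the walk returns the least d ≥ 1 with g^d mod n = 1 (given enough fuel)
theorem pvWalkEq (n g : Int) (hn : 2 ≤ n) (d : Nat)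
    (hd1 : PySem.Int.mod (g ^ d) n = 1)
    (hmin : ∀ i : Nat, 0 < i → i < d → PySem.Int.mod (g ^ i) n ≠ 1) :
    ∀ fuel j : Nat, 1 ≤ j → j ≤ d → d < fuel + j →
      walkOrd n g fuel (PySem.Int.mod (g ^ j) n) (j : Int) = (d : Int) := by
  intro fuel
  induction fuel with
  | zero => intro j h1 h2 h3; omega
  | succ fuel ih =>
    intro j h1 h2 h3
    by_cases hj : j = d
    · subst hj
      simp [walkOrd, hd1]
    · have hne : PySem.Int.mod (g ^ j) n ≠ 1 := hmin j (by omega) (by omega)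
      simp only [walkOrd]
      rw [if_neg (by simpa using hne)]
      rw [pvStep _ _ _ (by omega), ← pow_succ]
      have h := ih (j + 1) (by omega) (by omega) (by omega)
      rw [show ((j : Int) + 1) = ((j + 1 : Nat) : Int) by push_cast; ring]
      exact h

-- Euler's theorem, in the walk's vocabulary: some exponent in [1, n-1] sends g to 1
theorem pvEuler (n g : Int) (hn : 2 ≤ n) (hg0 : 1 ≤ g) (hco : Int.gcd g n = 1) :
    ∃ m : Nat, (0 < m ∧ m ≤ (n - 1).toNat) ∧ PySem.Int.mod (g ^ m) n = 1 := by
  refine ⟨n.toNat.totient, ⟨Nat.totient_pos.mpr (by omega), ?_⟩, ?_⟩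
  · have := Nat.totient_lt n.toNat (by omega)
    omega
  · have hc : g.toNat.Coprime n.toNat := by
      unfold Nat.Coprime
      rw [Int.gcd] at hco
      have e1 : g.toNat = g.natAbs := by omega
      have e2 : n.toNat = n.natAbs := by omega
      rw [e1, e2]; exact hco
    have h2 : g.toNat ^ n.toNat.totient % n.toNat = 1 % n.toNat := Nat.ModEq.pow_totient hc
    rw [Nat.one_mod_eq_one.mpr (by omega)] at h2
    rw [PySem.Int.mod_eq_emod_of_pos (by omega : (0:Int) < n)]
    have hcast : ((g.toNat ^ n.toNat.totient % n.toNat : Nat) : Int) = g ^ n.toNat.totient % n := by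
      push_cast
      rw [Int.toNat_of_nonneg (by omega : (0:Int) ≤ g), Int.toNat_of_nonneg (by omega : (0:Int) ≤ n)]
    rw [← hcast, h2]
    rfl

-- n ∣ x - 1 rephrased as a floor-mod equation
theorem pvModOne (n x : Int) (hn : 2 ≤ n) (h : n ∣ x - 1) : PySem.Int.mod x n = 1 := by
  rw [PySem.Int.mod_eq_emod_of_pos (by omega)]
  have h1 : (1 : Int) ≡ x [ZMOD n] := Int.modEq_iff_dvd.mpr (by simpa using h)
  have h2 := h1.symm
  unfold Int.ModEq at h2
  rw [h2, Int.emod_eq_of_lt (by omega) (by omega)]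

-- powers g^1 … g^d are pairwise distinct mod n (g a unit, d minimal)
theorem pvInj (n g : Int) (hn : 2 ≤ n) (hco : Int.gcd g n = 1) (d : Nat)
    (hmin : ∀ i : Nat, 0 < i → i < d → PySem.Int.mod (g ^ i) n ≠ 1) :
    ∀ i j : Nat, 1 ≤ i → i ≤ d → 1 ≤ j → j ≤ d →
      PySem.Int.mod (g ^ i) n = PySem.Int.mod (g ^ j) n → i = j := by
  have aux : ∀ i j : Nat, 1 ≤ i → i < j → j ≤ d →
      PySem.Int.mod (g ^ i) n ≠ PySem.Int.mod (g ^ j) n := by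
    intro i j h1 h2 h3 heq
    rw [PySem.Int.mod_eq_emod_of_pos (by omega), PySem.Int.mod_eq_emod_of_pos (by omega)] at heq
    have hdvd : n ∣ g ^ j - g ^ i := Int.ModEq.dvd (show g ^ i ≡ g ^ j [ZMOD n] from heq)
    have hfac : g ^ j - g ^ i = g ^ i * (g ^ (j - i) - 1) := by
      rw [mul_sub, mul_one, ← pow_add]
      congr 2
      omega
    rw [hfac] at hdvd
    have hcop : IsCoprime n (g ^ i) :=
      (Int.isCoprime_iff_gcd_eq_one.mpr (Int.gcd_pow_left_of_gcd_eq_one hco)).symm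
    have hd2 : n ∣ g ^ (j - i) - 1 := hcop.dvd_of_dvd_mul_left hdvd
    exact hmin (j - i) (by omega) (by omega) (pvModOne n _ hn hd2)
  intro i j h1 h2 h3 h4 heq
  rcases Nat.lt_trichotomy i j with h | h | h
  · exact absurd heq (aux i j h1 h h4)
  · exact h
  · exact absurd heq.symm (aux j i h3 h h2)

-- every power g^k (k ≥ 1) already occurs among g^1 … g^d
theorem pvReduce (n g : Int) (hn : 2 ≤ n) (d : Nat) (hd0 : 0 < d)
    (hd1 : PySem.Int.mod (g ^ d) n = 1) (k : Nat) (hk : 1 ≤ k) :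
    ∃ r : Nat, 1 ≤ r ∧ r ≤ d ∧ PySem.Int.mod (g ^ k) n = PySem.Int.mod (g ^ r) n := by
  refine ⟨(k - 1) % d + 1, by omega, by have := Nat.mod_lt (k - 1) hd0; omega, ?_⟩
  rw [PySem.Int.mod_eq_emod_of_pos (by omega), PySem.Int.mod_eq_emod_of_pos (by omega)]
  have h1 : g ^ d ≡ 1 [ZMOD n] := by
    unfold Int.ModEq
    rw [PySem.Int.mod_eq_emod_of_pos (by omega)] at hd1
    rw [hd1, Int.emod_eq_of_lt (by omega) (by omega)]
  have hk' : k = d * ((k - 1) / d) + ((k - 1) % d + 1) := by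
    have := Nat.div_add_mod (k - 1) d
    omega
  calc g ^ k % n = (g ^ d) ^ ((k - 1) / d) * g ^ ((k - 1) % d + 1) % n := by
        rw [← pow_mul, ← pow_add, ← hk']
    _ = g ^ ((k - 1) % d + 1) % n := by
        have h2 : (g ^ d) ^ ((k - 1) / d) * g ^ ((k - 1) % d + 1)
            ≡ 1 ^ ((k - 1) / d) * g ^ ((k - 1) % d + 1) [ZMOD n] :=
          (h1.pow _).mul (Int.ModEq.refl _)
        rw [one_pow, one_mul] at h2
        exact h2

-- membership in A's comprehension-built power set
theorem pvActualMem (g n y : Int) :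
    (y ∈ PySem.Set.ofList ((PySem.List.pyRange 1 n 1).map
        (fun powers => PySem.Int.mod (g ^ powers.toNat) n))
      ↔ ∃ k : Nat, 1 ≤ k ∧ k ≤ (n - 1).toNat ∧ y = PySem.Int.mod (g ^ k) n) := by
  rw [PySem.Set.mem_ofList]
  simp only [List.mem_map, PySem.List.mem_pyRange_one]
  constructor
  · rintro ⟨p, ⟨h1, h2⟩, he⟩
    exact ⟨p.toNat, by omega, by omega, he.symm⟩
  · rintro ⟨k, h1, h2, he⟩
    refine ⟨(k : Int), ⟨by omega, by omega⟩, ?_⟩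
    rw [he]
    simp

-- a non-unit g never passes A's set test (1 is required but never a power of g)
theorem pvNonUnit (n g : Int) (hn : 2 ≤ n) (hg1 : 1 ≤ g) (hco : Int.gcd g n ≠ 1) :
    PySem.Set.equal
      (PySem.Set.ofList ((PySem.List.pyRange 1 n 1).filter (fun num => sqrA num n == 1)))
      (PySem.Set.ofList ((PySem.List.pyRange 1 n 1).map
        (fun powers => PySem.Int.mod (g ^ powers.toNat) n))) = false := by
  rw [Bool.eq_false_iff]
  intro h
  rw [PySem.Set.equal_iff] at h
  have h1 : (1 : Int) ∈ PySem.Set.ofList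
      ((PySem.List.pyRange 1 n 1).filter (fun num => sqrA num n == 1)) := by
    rw [PySem.Set.mem_ofList, List.mem_filter, PySem.List.mem_pyRange_one]
    refine ⟨⟨le_refl 1, by omega⟩, ?_⟩
    rw [sqrA_eq_gcd 1 n (by omega) (by omega)]
    simp
  obtain ⟨k, hk1, _, hke⟩ := (pvActualMem g n 1).mp ((h 1).mp h1)
  have hdvd : n ∣ g ^ k - 1 := by
    apply Int.modEq_iff_dvd.mp
    unfold Int.ModEq
    rw [PySem.Int.mod_eq_emod_of_pos (by omega : (0:Int) < n)] at hke
    rw [← hke, Int.emod_eq_of_lt (by omega) (by omega)]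
  have ht1 : (Int.gcd g n : Int) ∣ g ^ k := dvd_pow (Int.gcd_dvd_left g n) (by omega)
  have ht2 : (Int.gcd g n : Int) ∣ g ^ k - 1 := dvd_trans (Int.gcd_dvd_right g n) hdvd
  have ht3 : (Int.gcd g n : Int) ∣ 1 := by
    have := dvd_sub ht1 ht2
    simpa using this
  have := Int.eq_one_of_dvd_one (by positivity) ht3
  omega

-- for a unit g, A's set test is exactly 'order of g = phi' — B's walk test
theorem pvUnit (n g : Int) (hn : 2 ≤ n) (hg1 : 1 ≤ g) (hco : Int.gcd g n = 1) :
    PySem.Set.equal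
      (PySem.Set.ofList ((PySem.List.pyRange 1 n 1).filter (fun num => sqrA num n == 1)))
      (PySem.Set.ofList ((PySem.List.pyRange 1 n 1).map
        (fun powers => PySem.Int.mod (g ^ powers.toNat) n)))
    = (walkOrd n g n.toNat (PySem.Int.mod g n) 1
        == (((PySem.List.pyRange 1 n 1).filter (fun m => Int.gcd m n == 1)).length : Int)) := by
  obtain ⟨m, ⟨hm0, hmle⟩, hm1⟩ := pvEuler n g hn hg1 hco
  have hEx : ∃ m : Nat, 0 < m ∧ PySem.Int.mod (g ^ m) n = 1 := ⟨m, hm0, hm1⟩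
  set d := Nat.find hEx with hdDef
  have hd0 : 0 < d := (Nat.find_spec hEx).1
  have hd1 : PySem.Int.mod (g ^ d) n = 1 := (Nat.find_spec hEx).2
  have hmin : ∀ i : Nat, 0 < i → i < d → PySem.Int.mod (g ^ i) n ≠ 1 := by
    intro i hi1 hi2 hc
    exact Nat.find_min hEx hi2 ⟨hi1, hc⟩
  have hdle : d ≤ (n - 1).toNat := le_trans (Nat.find_min' hEx ⟨hm0, hm1⟩) hmle
  have hw : walkOrd n g n.toNat (PySem.Int.mod g n) 1 = (d : Int) := by
    have h := pvWalkEq n g hn d hd1 hmin n.toNat 1 (le_refl 1) (by omega) (by omega)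
    rw [pow_one] at h
    simpa using h
  rw [hw]
  -- the two finite sets being compared
  set P : Finset Int := (Finset.Icc 1 d).image (fun k : Nat => PySem.Int.mod (g ^ k) n) with hP
  set Rl : List Int := (PySem.List.pyRange 1 n 1).filter (fun m => Int.gcd m n == 1) with hRl
  have hmemA : ∀ y : Int, (y ∈ PySem.Set.ofList ((PySem.List.pyRange 1 n 1).map
      (fun powers => PySem.Int.mod (g ^ powers.toNat) n))) ↔ y ∈ P := by
    intro y
    rw [pvActualMem g n y, hP]
    simp only [Finset.mem_image, Finset.mem_Icc]
    constructor
    · rintro ⟨k, h1, h2, he⟩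
      obtain ⟨r, hr1, hr2, hre⟩ := pvReduce n g hn d hd0 hd1 k h1
      exact ⟨r, ⟨hr1, hr2⟩, (he.trans hre).symm⟩
    · rintro ⟨k, ⟨h1, h2⟩, he⟩
      exact ⟨k, h1, by omega, he.symm⟩
  have hmemR : ∀ y : Int, (y ∈ PySem.Set.ofList
      ((PySem.List.pyRange 1 n 1).filter (fun num => sqrA num n == 1))) ↔ y ∈ Rl.toFinset := by
    intro y
    rw [PySem.Set.mem_ofList, pvFilterEq n, List.mem_toFinset, hRl]
  have hsub : P ⊆ Rl.toFinset := by
    intro y hy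
    rw [hP] at hy
    simp only [Finset.mem_image, Finset.mem_Icc] at hy
    obtain ⟨k, ⟨hk1, _⟩, he⟩ := hy
    have hy0 : 0 ≤ y := he ▸ PySem.Int.mod_nonneg _ (by omega)
    have hyn : y < n := he ▸ PySem.Int.mod_lt _ (by omega)
    have hgcd : Int.gcd y n = 1 := by
      rw [← he]
      rw [PySem.Int.mod_eq_emod_of_pos (by omega : (0:Int) < n)]
      rw [Int.gcd_emod]
      exact Int.gcd_pow_left_of_gcd_eq_one hco
    have hy1 : 1 ≤ y := by
      rcases eq_or_lt_of_le hy0 with h | h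
      · exfalso
        rw [← h] at hgcd
        rw [Int.gcd] at hgcd
        simp at hgcd
        omega
      · omega
    rw [List.mem_toFinset, hRl, List.mem_filter, PySem.List.mem_pyRange_one]
    exact ⟨⟨hy1, hyn⟩, by simp [hgcd]⟩
  have hPcard : P.card = d := by
    rw [hP, Finset.card_image_of_injOn, Nat.card_Icc]
    · omega
    · intro i hi j hj he
      rw [Finset.coe_Icc, Set.mem_Icc] at hi hj
      exact pvInj n g hn hco d hmin i j hi.1 hi.2 hj.1 hj.2 he
  have hRcard : Rl.toFinset.card = Rl.length := by
    rw [hRl]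
    exact List.toFinset_card_of_nodup ((PySem.List.nodup_pyRange_one 1 n).filter _)
  rw [Bool.eq_iff_iff, PySem.Set.equal_iff, beq_iff_eq]
  constructor
  · intro hiff
    have hPR : P = Rl.toFinset := by
      apply Finset.ext
      intro y
      rw [← hmemA y, ← hmemR y]
      exact (hiff y).symm
    have : d = Rl.length := by rw [← hPcard, ← hRcard, hPR]
    omega
  · intro hlen
    have hcard : d = Rl.length := by omega
    have hPR : P = Rl.toFinset :=
      Finset.eq_of_subset_of_card_le hsub (by omega)
    intro y
    rw [hmemA y, hmemR y, hPR]

-- A's filter-then-scan equals B's fused single scan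
theorem pvFuse (p q : Int → Bool) (l : List Int) :
    ∀ st : Int × Bool,
    ((l.filter p).foldl (fun st r =>
        if st.2 then st else if q r then (r, true) else (r, false)) st)
    = (l.foldl (fun st g =>
        if st.2 then st
        else if p g then (if q g then (g, true) else (g, false)) else st) st) := by
  induction l with
  | nil => intro st; rfl
  | cons a l ih =>
    intro st
    by_cases h : p a = true
    · rw [List.filter_cons_of_pos h]
      simp only [List.foldl, h, if_true]
      exact ih _
    · rw [List.filter_cons_of_neg (by simpa using h)]
      simp only [List.foldl]
      rw [ih]
      congr 1
      simp [h]

theorem pvMain (n : Int) : primRoots n = primRoots_alt n := by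
  by_cases hn : 2 ≤ n
  · simp only [primRoots, primRoots_alt]
    rw [PySem.List.foldl_append_if
      (fun g => PySem.Set.equal
        (PySem.Set.ofList ((PySem.List.pyRange 1 n 1).filter (fun num => sqrA num n == 1)))
        (PySem.Set.ofList ((PySem.List.pyRange 1 n 1).map
          (fun powers => PySem.Int.mod (g ^ powers.toNat) n))))
      (fun g => g) (PySem.List.pyRange 1 n 1) []]
    rw [List.nil_append, List.map_id']
    rw [pvFuse]
    apply congrArg
    apply PySem.List.foldl_congr_mem
    intro st g hg
    rw [PySem.List.mem_pyRange_one] at hg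
    by_cases hs : st.2 = true
    · simp [hs]
    · rw [if_neg hs, if_neg hs]
      by_cases hc : Int.gcd g n = 1
      · rw [show (Int.gcd g n != 1) = false by simp [hc], if_neg Bool.false_ne_true]
        rw [pvUnit n g hn hg.1 hc, pvPhiEq, ← isSimpleA_ne_zero]
      · rw [pvNonUnit n g hn hg.1 hc,
            show (Int.gcd g n != 1) = true by simp [hc]]
        simp
  · have hL : PySem.List.pyRange 1 n 1 = [] := by
      rw [PySem.List.pyRange_one]
      simp [show (n - 1).toNat = 0 by omega]
    simp [primRoots, primRoots_alt, hL]

-- ===== VERDICT (by name: the statement is the Claim_ definition above) =====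
theorem primRoots_spec : Claim_equal_primRoots := by
  intro modulo _
  unfold Spec_primRoots
  exact pvMain modulo
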